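-- pv_equiv track=rewrite | github.com/yjenexd/DiabetesConnect | backend/agents/graph_patient.py | _split_detected_items
-- ===== SOURCE A (Python) =====
-- def _split_detected_items(food_name: str):
--     if not food_name:
--         return {"foods": [], "drinks": []}
--
--     separators = [",", " and ", " & ", " + ", "/"]
--     raw_parts = [food_name]
--     for sep in separators:
--         next_parts = []
--         for part in raw_parts:
--             next_parts.extend(part.split(sep))
--         raw_parts = next_parts
--
--     items = [part.strip() for part in raw_parts if part.strip()]
--     if not items:
--         items = [food_name.strip()]
--
--     drink_keywords = {
--         "tea", "teh", "coffee", "kopi", "milk", "juice", "water", "milo",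
--         "latte", "soda", "cola", "drink", "smoothie", "bubble",
--     }
--
--     foods = []
--     drinks = []
--     for item in items:
--         lower_item = item.lower()
--         if any(keyword in lower_item for keyword in drink_keywords):
--             drinks.append(item)
--         else:
--             foods.append(item)
--
--     if not foods and not drinks:
--         foods = [food_name.strip()]
--
--     return {"foods": foods, "drinks": drinks}
-- ===== SOURCE B (Python) =====
-- def _split_detected_items(food_name: str):
--     if not food_name:
--         return {"foods": [], "drinks": []}
--
--     def explode(seps, s):
--         if not seps:
--             return [s]
--         return [piece for chunk in s.split(seps[0]) for piece in explode(seps[1:], chunk)]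
--
--     parts = explode([",", " and ", " & ", " + ", "/"], food_name)
--     items = [p.strip() for p in parts if p.strip()] or [food_name.strip()]
--
--     keywords = (
--         "tea", "teh", "coffee", "kopi", "milk", "juice", "water", "milo",
--         "latte", "soda", "cola", "drink", "smoothie", "bubble",
--     )
--
--     def is_drink(item):
--         low = item.lower()
--         return any(k in low for k in keywords)
--
--     return {"foods": [i for i in items if not is_drink(i)],
--             "drinks": [i for i in items if is_drink(i)]}
-- ===== Notes on version B (the rewrite author's own statement) =====
-- stated objective: alternative
-- what changed: The iterative worklist that re-splits the whole part list once per separator is replaced by a single recursion over the separator list that fully explodes each part depth-first, and the accumulator loop that classifies items into foods/drinks is replaced by two filter comprehensions over a shared is_drink predicate (making the dead not-foods-and-not-drinks fallback disappear).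
import Mathlib
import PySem

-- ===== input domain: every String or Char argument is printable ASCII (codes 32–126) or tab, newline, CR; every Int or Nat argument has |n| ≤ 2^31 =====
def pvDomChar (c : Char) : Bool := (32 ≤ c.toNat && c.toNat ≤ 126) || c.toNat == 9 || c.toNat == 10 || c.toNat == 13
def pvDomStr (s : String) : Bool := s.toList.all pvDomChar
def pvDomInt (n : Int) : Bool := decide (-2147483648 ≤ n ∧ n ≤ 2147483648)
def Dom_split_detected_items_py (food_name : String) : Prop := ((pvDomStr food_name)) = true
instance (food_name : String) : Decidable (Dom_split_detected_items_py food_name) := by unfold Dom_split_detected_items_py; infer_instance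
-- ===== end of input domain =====

-- B replaces A's per-separator worklist re-splitting with one depth-first recursion over the
-- separator list and classifies items by two filters instead of an accumulator loop (alternative
-- decomposition, same cost). Proof: string facts are done on the List Char side per PySem.

-- ===== PORT A =====
-- Literal transliteration of A: worklist re-split per separator, strip-filter with fallback,
-- one accumulator loop over items, final not-foods-and-not-drinks fallback.
def split_detected_items_py (food_name : String) : List (String × List String) :=
  if food_name = "" then [("foods", []), ("drinks", [])]
  else
    let separators : List (List Char) := [",".toList, " and ".toList, " & ".toList, " + ".toList, "/".toList]
    let raw_parts := separators.foldl
      (fun raw_parts sep => raw_parts.foldl (fun next_parts part => next_parts ++ PySem.Chars.splitOn part sep) [])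
      [food_name.toList]
    let items := (raw_parts.filter (fun p => PySem.Chars.strip p ≠ [])).map PySem.Chars.strip
    let items := if items = [] then [PySem.Chars.strip food_name.toList] else items
    let drink_keywords : List (List Char) := ["tea".toList, "teh".toList, "coffee".toList, "kopi".toList,
      "milk".toList, "juice".toList, "water".toList, "milo".toList, "latte".toList, "soda".toList,
      "cola".toList, "drink".toList, "smoothie".toList, "bubble".toList]
    let fd := items.foldl
      (fun fd item =>
        if drink_keywords.any (fun keyword => PySem.Chars.isIn keyword (PySem.Chars.lower item)) then
          (fd.1, fd.2 ++ [item])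
        else
          (fd.1 ++ [item], fd.2))
      ([], [])
    let foods := if fd.1 = [] ∧ fd.2 = [] then [PySem.Chars.strip food_name.toList] else fd.1
    [("foods", foods.map String.ofList), ("drinks", fd.2.map String.ofList)]

-- ===== PORT B =====
-- B-side helpers (Source B's explode / keywords / is_drink)
def pvExplode : List (List Char) → List Char → List (List Char)
  | [], s => [s]
  | sep :: rest, s => (PySem.Chars.splitOn s sep).flatMap (fun chunk => pvExplode rest chunk)

def pvKeywords : List (List Char) := ["tea".toList, "teh".toList, "coffee".toList, "kopi".toList,
  "milk".toList, "juice".toList, "water".toList, "milo".toList, "latte".toList, "soda".toList,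
  "cola".toList, "drink".toList, "smoothie".toList, "bubble".toList]

def pvIsDrink (item : List Char) : Bool :=
  pvKeywords.any (fun k => PySem.Chars.isIn k (PySem.Chars.lower item))

def split_detected_items_py_alt (food_name : String) : List (String × List String) :=
  if food_name = "" then [("foods", []), ("drinks", [])]
  else
    let parts := pvExplode [",".toList, " and ".toList, " & ".toList, " + ".toList, "/".toList] food_name.toList
    let stripped := (parts.filter (fun p => PySem.Chars.strip p ≠ [])).map PySem.Chars.strip
    let items := if stripped = [] then [PySem.Chars.strip food_name.toList] else stripped
    [("foods", (items.filter (fun i => !pvIsDrink i)).map String.ofList),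
     ("drinks", (items.filter pvIsDrink).map String.ofList)]

-- ===== PRECONDITION & SPEC =====
def Spec_split_detected_items_py (food_name : String) (out : List (String × List String)) : Prop := out = split_detected_items_py_alt food_name
instance (food_name : String) (out : List (String × List String)) : Decidable (Spec_split_detected_items_py food_name out) := by unfold Spec_split_detected_items_py; infer_instance

-- ===== CLAIM (what is proved, stated in full; the proofs are below) =====
def Claim_equal_split_detected_items_py : Prop := ∀ (food_name : String), Dom_split_detected_items_py food_name → Spec_split_detected_items_py food_name (split_detected_items_py food_name)

-- ===== LEMMAS AND PROOFS =====

-- A's worklist pass over all separators equals B's per-part depth-first explosion.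
lemma pv_fold_eq_explode (seps : List (List Char)) : ∀ (parts : List (List Char)),
    seps.foldl (fun raw_parts sep => raw_parts.foldl (fun next_parts part => next_parts ++ PySem.Chars.splitOn part sep) []) parts
      = parts.flatMap (fun p => pvExplode seps p) := by
  induction seps with
  | nil => intro parts; simp [pvExplode]
  | cons sep rest ih =>
      intro parts
      rw [List.foldl_cons,
        show (List.foldl (fun next_parts part => next_parts ++ PySem.Chars.splitOn part sep) [] parts)
            = parts.flatMap (fun x => PySem.Chars.splitOn x sep) from by
          rw [PySem.List.foldl_append_eq_flatMap]; simp [List.flatMap],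
        ih]
      simp only [pvExplode, List.flatMap_assoc]

-- A's accumulator classification loop equals the pair of filters B uses.
lemma pv_fold_eq_partition (p : List Char → Bool) : ∀ (items : List (List Char)) (f d : List (List Char)),
    items.foldl (fun fd item => if p item then (fd.1, fd.2 ++ [item]) else (fd.1 ++ [item], fd.2)) (f, d)
      = (f ++ items.filter (fun i => !p i), d ++ items.filter p) := by
  intro items
  induction items with
  | nil => intro f d; simp
  | cons x xs ih =>
      intro f d
      by_cases hx : p x = true <;> simp [hx, ih]

-- On a nonempty item list, the two filters cannot both be empty.
lemma pv_filters_not_both_nil (p : List Char → Bool) (l : List (List Char)) (hl : l ≠ []) :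
    ¬ (l.filter (fun i => !p i) = [] ∧ l.filter p = []) := by
  rintro ⟨h1, h2⟩
  rcases l with _ | ⟨x, xs⟩
  · exact hl rfl
  · by_cases hx : p x = true <;> simp [hx] at h1 h2

-- ===== VERDICT (by name: the statement is the Claim_ definition above) =====
theorem split_detected_items_py_spec : Claim_equal_split_detected_items_py := by
  intro food_name _
  unfold Spec_split_detected_items_py split_detected_items_py split_detected_items_py_alt
  by_cases h : food_name = ""
  · rw [if_pos h, if_pos h]
  · simp only [h, if_false]
    rw [pv_fold_eq_explode]
    simp only [List.flatMap_cons, List.flatMap_nil, List.append_nil]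
    set stripped := ((pvExplode [",".toList, " and ".toList, " & ".toList, " + ".toList, "/".toList]
        food_name.toList).filter (fun p => PySem.Chars.strip p ≠ [])).map PySem.Chars.strip with hstr
    set items := if stripped = [] then [PySem.Chars.strip food_name.toList] else stripped with hitems
    have hne : items ≠ [] := by
      rw [hitems]; split_ifs with hs
      · simp
      · exact hs
    rw [pv_fold_eq_partition (fun item => (["tea".toList, "teh".toList, "coffee".toList,
      "kopi".toList, "milk".toList, "juice".toList, "water".toList, "milo".toList, "latte".toList,
      "soda".toList, "cola".toList, "drink".toList, "smoothie".toList, "bubble".toList].any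
        (fun keyword => PySem.Chars.isIn keyword (PySem.Chars.lower item)))) items [] []]
    simp only [List.nil_append]
    rw [if_neg (pv_filters_not_both_nil _ items hne)]
    rfl
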